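-- pv_equiv track=rewrite | github.com/muskasaid02/csc349practice | main.py | max_profit_cloth_cutting
-- ===== SOURCE A (Python) =====
-- def max_profit_cloth_cutting(X, Y, products):
--     # Initialize the DP table
--     dp = [[0] * (Y + 1) for _ in range(X + 1)]
--
--     # Fill the DP table using the recursive formula
--     for w in range(1, X + 1):
--         for h in range(1, Y + 1):
--             for product in products:
--                 a, b, c = product
--                 if a <= w and b <= h:
--                     dp[w][h] = max(dp[w][h], c + dp[w - a][h - b])
--             for k in range(1, w):
--                 dp[w][h] = max(dp[w][h], dp[k][h] + dp[w - k][h])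
--             for k in range(1, h):
--                 dp[w][h] = max(dp[w][h], dp[w][k] + dp[w][h - k])
--
--     return dp[X][Y]
-- ===== SOURCE B (Python) =====
-- # B: top-down memoized recursion over (width, height) instead of A's bottom-up table fill.
-- def max_profit_cloth_cutting(X, Y, products):
--     cache = [[None] * (Y + 1) for _ in range(X + 1)]
--
--     def solve(w, h):
--         if w == 0 or h == 0:
--             return 0
--         v = cache[w][h]
--         if v is not None:
--             return v
--         best = 0
--         for a, b, c in products:
--             if a <= w and b <= h:
--                 best = max(best, c + solve(w - a, h - b))
--         for k in range(1, w):
--             best = max(best, solve(k, h) + solve(w - k, h))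
--         for k in range(1, h):
--             best = max(best, solve(w, k) + solve(w, h - k))
--         cache[w][h] = best
--         return best
--
--     return solve(X, Y)
-- ===== Notes on version B (the rewrite author's own statement) =====
-- stated objective: alternative
-- what changed: Replaces A's bottom-up triple-loop table fill with a top-down memoized recursion solve(w,h) over a lazily filled cache table.
-- outside the precondition, e.g. on max_profit_cloth_cutting(1, 1, [(0, 0, 5)]): A returns 5, B raises RecursionError
import Mathlib
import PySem

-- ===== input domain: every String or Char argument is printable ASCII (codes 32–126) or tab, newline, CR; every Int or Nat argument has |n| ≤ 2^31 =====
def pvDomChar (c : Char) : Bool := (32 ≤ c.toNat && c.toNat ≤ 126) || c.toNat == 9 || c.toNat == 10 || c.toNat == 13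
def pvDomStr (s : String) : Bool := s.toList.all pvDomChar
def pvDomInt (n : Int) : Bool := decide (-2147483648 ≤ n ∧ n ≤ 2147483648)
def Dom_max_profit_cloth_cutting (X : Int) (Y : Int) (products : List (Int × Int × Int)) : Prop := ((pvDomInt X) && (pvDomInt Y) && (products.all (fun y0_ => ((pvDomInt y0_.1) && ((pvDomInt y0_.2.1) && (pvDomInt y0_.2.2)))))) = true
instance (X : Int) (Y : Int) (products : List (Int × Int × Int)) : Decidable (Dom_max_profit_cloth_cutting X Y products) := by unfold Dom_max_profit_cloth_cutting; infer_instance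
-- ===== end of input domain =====

-- B replaces A's bottom-up table fill by a top-down memoized recursion; equivalence proved on the Pre_ domain below.

-- ===== PORT A =====
-- The Python 2D list dp is ported as Array (Array Int) (a mutable Python list is an array).
-- dp[i][j] read: Python raises IndexError out of range; every read A performs on a Pre_ input
-- is in range and has nonnegative indices, so the .toNat and the default 0 are never hit there.
def pvGet2 (dp : Array (Array Int)) (i j : Int) : Int :=
  ((dp[i.toNat]?).bind (fun row => row[j.toNat]?)).getD 0

-- dp[i][j] = v write: A only writes at indices 1 ≤ w ≤ X, 1 ≤ h ≤ Y, in range on Pre_ inputs.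
def pvSet2 (dp : Array (Array Int)) (i j v : Int) : Array (Array Int) :=
  dp.modify i.toNat (fun row => row.setIfInBounds j.toNat v)

def max_profit_cloth_cutting (X : Int) (Y : Int) (products : List (Int × Int × Int)) : Int :=
  let dp : Array (Array Int) := Array.replicate (X + 1).toNat (Array.replicate (Y + 1).toNat 0)
  let dp := (PySem.List.pyRange 1 (X + 1) 1).foldl (fun dp w =>
    (PySem.List.pyRange 1 (Y + 1) 1).foldl (fun dp h =>
      let dp := products.foldl (fun dp p =>
        if p.1 ≤ w ∧ p.2.1 ≤ h then
          pvSet2 dp w h (max (pvGet2 dp w h) (p.2.2 + pvGet2 dp (w - p.1) (h - p.2.1)))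
        else dp) dp
      let dp := (PySem.List.pyRange 1 w 1).foldl (fun dp k =>
        pvSet2 dp w h (max (pvGet2 dp w h) (pvGet2 dp k h + pvGet2 dp (w - k) h))) dp
      (PySem.List.pyRange 1 h 1).foldl (fun dp k =>
        pvSet2 dp w h (max (pvGet2 dp w h) (pvGet2 dp w k + pvGet2 dp w (h - k)))) dp) dp) dp
  pvGet2 dp X Y

-- ===== PORT B =====
-- cache[w][h] read/write (the Python 2D list cache, ported as an array like A's dp;
-- on Pre_ inputs every access is in range with nonnegative indices).
def pvCGet (ca : Array (Array (Option Int))) (i j : Int) : Option Int :=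
  ((ca[i.toNat]?).bind (fun row => row[j.toNat]?)).getD none

def pvCSet (ca : Array (Array (Option Int))) (i j : Int) (v : Option Int) :
    Array (Array (Option Int)) :=
  ca.modify i.toNat (fun row => row.setIfInBounds j.toNat v)

-- solve(w, h) with the cache threaded through; the Nat fuel only makes the recursion
-- total in Lean (on Pre_ inputs the initial fuel strictly exceeds every recursion depth,
-- so the fuel-exhausted branch is never taken).
def pvSolve (products : List (Int × Int × Int)) :
    Nat → Int → Int → Array (Array (Option Int)) → Int × Array (Array (Option Int))
  | 0, _, _, cache => (0, cache)
  | Nat.succ f, w, h, cache =>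
    if w = 0 ∨ h = 0 then (0, cache)
    else
      match pvCGet cache w h with
      | some v => (v, cache)
      | none =>
        let s := products.foldl (fun (s : Int × Array (Array (Option Int))) p =>
          if p.1 ≤ w ∧ p.2.1 ≤ h then
            let r := pvSolve products f (w - p.1) (h - p.2.1) s.2
            (max s.1 (p.2.2 + r.1), r.2)
          else s) (0, cache)
        let s := (PySem.List.pyRange 1 w 1).foldl (fun s k =>
          let r1 := pvSolve products f k h s.2
          let r2 := pvSolve products f (w - k) h r1.2
          (max s.1 (r1.1 + r2.1), r2.2)) s
        let s := (PySem.List.pyRange 1 h 1).foldl (fun s k =>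
          let r1 := pvSolve products f w k s.2
          let r2 := pvSolve products f w (h - k) r1.2
          (max s.1 (r1.1 + r2.1), r2.2)) s
        (s.1, pvCSet s.2 w h (some s.1))

def max_profit_cloth_cutting_alt (X : Int) (Y : Int) (products : List (Int × Int × Int)) : Int :=
  (pvSolve products (X.toNat + Y.toNat + 1) X Y
    (Array.replicate (X + 1).toNat (Array.replicate (Y + 1).toNat none))).1

-- ===== PRECONDITION & SPEC =====
-- Pre_ is the natural domain of the cutting problem: nonnegative cloth dimensions and,
-- when the cloth is nonempty, every product either has nonnegative, not-both-zero
-- dimensions or cannot fit at all.  Outside it A raises IndexError (negative X or Y, or a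
-- fitting product with a negative dimension driving an index past the table) except for
-- products with both dimensions zero, where A returns an accidental single-pass value
-- while B's recursion does not terminate (RecursionError).
def Pre_max_profit_cloth_cutting (X : Int) (Y : Int) (products : List (Int × Int × Int)) : Prop :=
  0 ≤ X ∧ 0 ≤ Y ∧ (X = 0 ∨ Y = 0 ∨ ∀ p ∈ products,
    (0 ≤ p.1 ∧ 0 ≤ p.2.1 ∧ (0 < p.1 ∨ 0 < p.2.1)) ∨ X < p.1 ∨ Y < p.2.1)

instance (X : Int) (Y : Int) (products : List (Int × Int × Int)) : Decidable (Pre_max_profit_cloth_cutting X Y products) := by unfold Pre_max_profit_cloth_cutting; infer_instance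

def pvWitness_max_profit_cloth_cutting : Int × Int × (List (Int × Int × Int)) :=
  (3, 2, [(1, 1, 2), (2, 1, 5), (1, 2, 3)])

def Spec_max_profit_cloth_cutting (X : Int) (Y : Int) (products : List (Int × Int × Int)) (out : Int) : Prop := out = max_profit_cloth_cutting_alt X Y products
instance (X : Int) (Y : Int) (products : List (Int × Int × Int)) (out : Int) : Decidable (Spec_max_profit_cloth_cutting X Y products out) := by unfold Spec_max_profit_cloth_cutting; infer_instance

-- ===== CLAIM (what is proved, stated in full; the proofs are below) =====
def Claim_equal_max_profit_cloth_cutting : Prop := ∀ (X : Int) (Y : Int) (products : List (Int × Int × Int)), Dom_max_profit_cloth_cutting X Y products → Pre_max_profit_cloth_cutting X Y products → Spec_max_profit_cloth_cutting X Y products (max_profit_cloth_cutting X Y products)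

-- ===== LEMMAS AND PROOFS =====

-- The common "cell value from an oracle g on the subrectangles" expression.
def pvBody (products : List (Int × Int × Int)) (g : Int → Int → Int) (w h init : Int) : Int :=
  (PySem.List.pyRange 1 h 1).foldl (fun cur k => max cur (g w k + g w (h - k)))
    ((PySem.List.pyRange 1 w 1).foldl (fun cur k => max cur (g k h + g (w - k) h))
      (products.foldl (fun cur p =>
        if p.1 ≤ w ∧ p.2.1 ≤ h then max cur (p.2.2 + g (w - p.1) (h - p.2.1)) else cur) init))

-- Fuel-indexed unmemoized recursion: the mathematical value both ports compute.
def pvF (products : List (Int × Int × Int)) : Nat → Int → Int → Int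
  | 0, _, _ => 0
  | Nat.succ f, w, h =>
    if w = 0 ∨ h = 0 then 0 else pvBody products (pvF products f) w h 0

def pvFc (products : List (Int × Int × Int)) (w h : Int) : Int :=
  pvF products (w.toNat + h.toNat + 1) w h

theorem pvFc_zero (products : List (Int × Int × Int)) (w h : Int) (hz : w = 0 ∨ h = 0) :
    pvFc products w h = 0 := by
  simp [pvFc, pvF, hz]

theorem pvBody_congr (products : List (Int × Int × Int)) (g g' : Int → Int → Int)
    (w h init : Int)
    (h1 : ∀ p ∈ products, p.1 ≤ w → p.2.1 ≤ h →
      g (w - p.1) (h - p.2.1) = g' (w - p.1) (h - p.2.1))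
    (h2 : ∀ k : Int, 1 ≤ k → k < w → g k h = g' k h ∧ g (w - k) h = g' (w - k) h)
    (h3 : ∀ k : Int, 1 ≤ k → k < h → g w k = g' w k ∧ g w (h - k) = g' w (h - k)) :
    pvBody products g w h init = pvBody products g' w h init := by
  unfold pvBody
  have e1 : List.foldl (fun cur p =>
        if p.1 ≤ w ∧ p.2.1 ≤ h then max cur (p.2.2 + g (w - p.1) (h - p.2.1)) else cur) init products
      = List.foldl (fun cur p =>
        if p.1 ≤ w ∧ p.2.1 ≤ h then max cur (p.2.2 + g' (w - p.1) (h - p.2.1)) else cur) init products := by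
    apply PySem.List.foldl_congr_mem
    intro acc p hp
    by_cases hc : p.1 ≤ w ∧ p.2.1 ≤ h
    · simp only [if_pos hc, h1 p hp hc.1 hc.2]
    · simp only [if_neg hc]
  rw [e1]
  have e2 : ∀ init2 : Int, List.foldl (fun cur k => max cur (g k h + g (w - k) h)) init2 (PySem.List.pyRange 1 w)
      = List.foldl (fun cur k => max cur (g' k h + g' (w - k) h)) init2 (PySem.List.pyRange 1 w) := by
    intro init2
    apply PySem.List.foldl_congr_mem
    intro acc k hk
    rcases PySem.List.mem_pyRange_one.mp hk with ⟨hk1, hk2⟩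
    rcases h2 k hk1 hk2 with ⟨d1, d2⟩
    rw [d1, d2]
  rw [e2]
  apply PySem.List.foldl_congr_mem
  intro acc k hk
  rcases PySem.List.mem_pyRange_one.mp hk with ⟨hk1, hk2⟩
  rcases h3 k hk1 hk2 with ⟨d1, d2⟩
  rw [d1, d2]

theorem pvF_fuel (products : List (Int × Int × Int)) (X Y : Int)
    (HQ : ∀ p ∈ products, (0 ≤ p.1 ∧ 0 ≤ p.2.1 ∧ (0 < p.1 ∨ 0 < p.2.1)) ∨ X < p.1 ∨ Y < p.2.1) :
    ∀ f w h, 0 ≤ w → w ≤ X → 0 ≤ h → h ≤ Y → w.toNat + h.toNat < f →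
      pvF products f w h = pvFc products w h := by
  intro f
  induction f using Nat.strong_induction_on with
  | _ f IH =>
    intro w h hw hwX hh hhY hlt
    match f, hlt with
    | Nat.succ f', hlt =>
      by_cases hz : w = 0 ∨ h = 0
      · rw [pvFc_zero products w h hz]; simp [pvF, hz]
      · rw [not_or] at hz
        have hw1 : 1 ≤ w := by omega
        have hh1 : 1 ≤ h := by omega
        show pvF products (Nat.succ f') w h = pvF products (w.toNat + h.toNat + 1) w h
        rw [show pvF products (Nat.succ f') w h
              = pvBody products (pvF products f') w h 0 by
            simp [pvF, hz.1, hz.2],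
          show pvF products (w.toNat + h.toNat + 1) w h
              = pvBody products (pvF products (w.toNat + h.toNat)) w h 0 by
            simp [pvF, hz.1, hz.2]]
        have key : ∀ (m : Nat) (w' h' : Int), 0 ≤ w' → w' ≤ X → 0 ≤ h' → h' ≤ Y →
            w'.toNat + h'.toNat < m → m < Nat.succ f' ∨ m = w.toNat + h.toNat →
            pvF products m w' h' = pvFc products w' h' := by
          intro m w' h' hw' hw'X hh' hh'Y hm hcase
          rcases hcase with hlt' | heq
          · exact IH m hlt' w' h' hw' hw'X hh' hh'Y hm
          · exact IH m (by omega) w' h' hw' hw'X hh' hh'Y hm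
        apply pvBody_congr
        · intro p hp hpw hph
          have hq := HQ p hp
          rw [key f' _ _ (by omega) (by omega) (by omega) (by omega) (by omega) (Or.inl (by omega)),
            key (w.toNat + h.toNat) _ _ (by omega) (by omega) (by omega) (by omega) (by omega) (Or.inr rfl)]
        · intro k hk1 hk2
          constructor
          · rw [key f' _ _ (by omega) (by omega) (by omega) (by omega) (by omega) (Or.inl (by omega)),
              key (w.toNat + h.toNat) _ _ (by omega) (by omega) (by omega) (by omega) (by omega) (Or.inr rfl)]
          · rw [key f' _ _ (by omega) (by omega) (by omega) (by omega) (by omega) (Or.inl (by omega)),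
              key (w.toNat + h.toNat) _ _ (by omega) (by omega) (by omega) (by omega) (by omega) (Or.inr rfl)]
        · intro k hk1 hk2
          constructor
          · rw [key f' _ _ (by omega) (by omega) (by omega) (by omega) (by omega) (Or.inl (by omega)),
              key (w.toNat + h.toNat) _ _ (by omega) (by omega) (by omega) (by omega) (by omega) (Or.inr rfl)]
          · rw [key f' _ _ (by omega) (by omega) (by omega) (by omega) (by omega) (Or.inl (by omega)),
              key (w.toNat + h.toNat) _ _ (by omega) (by omega) (by omega) (by omega) (by omega) (Or.inr rfl)]

-- pvFc satisfies its own one-step unfolding with oracle pvFc.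
theorem pvFc_eq_body (products : List (Int × Int × Int)) (X Y : Int)
    (HQ : ∀ p ∈ products, (0 ≤ p.1 ∧ 0 ≤ p.2.1 ∧ (0 < p.1 ∨ 0 < p.2.1)) ∨ X < p.1 ∨ Y < p.2.1)
    (w h : Int) (hw : 1 ≤ w) (hwX : w ≤ X) (hh : 1 ≤ h) (hhY : h ≤ Y) :
    pvFc products w h = pvBody products (pvFc products) w h 0 := by
  have hz1 : w ≠ 0 := by omega
  have hz2 : h ≠ 0 := by omega
  rw [show pvFc products w h = pvBody products (pvF products (w.toNat + h.toNat)) w h 0 by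
    simp [pvFc, pvF, hz1, hz2]]
  apply pvBody_congr
  · intro p hp hpw hph
    have hq := HQ p hp
    rw [pvF_fuel products X Y HQ _ _ _ (by omega) (by omega) (by omega) (by omega) (by omega)]
  · intro k hk1 hk2
    exact ⟨pvF_fuel products X Y HQ _ _ _ (by omega) (by omega) (by omega) (by omega) (by omega),
      pvF_fuel products X Y HQ _ _ _ (by omega) (by omega) (by omega) (by omega) (by omega)⟩
  · intro k hk1 hk2
    exact ⟨pvF_fuel products X Y HQ _ _ _ (by omega) (by omega) (by omega) (by omega) (by omega),
      pvF_fuel products X Y HQ _ _ _ (by omega) (by omega) (by omega) (by omega) (by omega)⟩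

-- ---------- Port B side ----------

-- cache invariant: every cached value is the true value.
def pvCInv (products : List (Int × Int × Int)) (ca : Array (Array (Option Int))) : Prop :=
  ∀ (i j : Nat) (v : Int), pvCGet ca (i : Int) (j : Int) = some v → v = pvFc products i j

theorem pvCGet_set_cases (ca : Array (Array (Option Int))) (w h : Int) (v : Option Int)
    (i j : Nat) :
    pvCGet (pvCSet ca w h v) i j = pvCGet ca i j ∨
    (i = w.toNat ∧ j = h.toNat ∧ pvCGet (pvCSet ca w h v) i j = v) := by
  simp only [pvCGet, pvCSet, Int.toNat_natCast, Array.getElem?_modify]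
  by_cases hii : w.toNat = i
  · cases hg : ca[i]? with
    | none => left; rw [if_pos hii]; simp
    | some row =>
      rw [if_pos hii]
      simp only [Option.map_some, Option.bind_some, Array.getElem?_setIfInBounds]
      by_cases hjj : h.toNat = j
      · rw [if_pos hjj]
        by_cases hsz : h.toNat < row.size
        · right
          exact ⟨hii.symm, hjj.symm, by rw [if_pos hsz]; rfl⟩
        · left
          rw [if_neg hsz]
          have : row[j]? = none := by
            apply Array.getElem?_eq_none
            omega
          rw [this]
      · left; rw [if_neg hjj]
  · left; rw [if_neg hii]

theorem pvSolve_correct (products : List (Int × Int × Int)) (X Y : Int)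
    (HQ : ∀ p ∈ products, (0 ≤ p.1 ∧ 0 ≤ p.2.1 ∧ (0 < p.1 ∨ 0 < p.2.1)) ∨ X < p.1 ∨ Y < p.2.1) :
    ∀ f w h cache, 0 ≤ w → w ≤ X → 0 ≤ h → h ≤ Y → w.toNat + h.toNat < f →
      pvCInv products cache →
      (pvSolve products f w h cache).1 = pvFc products w h ∧
      pvCInv products (pvSolve products f w h cache).2 := by
  intro f
  induction f with
  | zero => intro w h cache hw hwX hh hhY hlt; omega
  | succ f' IHf =>
    intro w h cache hw hwX hh hhY hlt hinv
    by_cases hz : w = 0 ∨ h = 0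
    · constructor
      · simp [pvSolve, hz, pvFc_zero products w h hz]
      · simp only [pvSolve, if_pos hz]
        exact hinv
    · rw [not_or] at hz
      have hw1 : 1 ≤ w := by omega
      have hh1 : 1 ≤ h := by omega
      have hsum : w.toNat + h.toNat ≤ f' := by omega
      cases hm : pvCGet cache w h with
      | some v =>
        have hv : v = pvFc products w h := by
          have hcast : pvCGet cache ((w.toNat : Nat) : Int) ((h.toNat : Nat) : Int) = some v := by
            rw [Int.toNat_of_nonneg hw, Int.toNat_of_nonneg hh]; exact hm
          have := hinv w.toNat h.toNat v hcast
          rw [this, Int.toNat_of_nonneg hw, Int.toNat_of_nonneg hh]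
        constructor
        · simp only [pvSolve, if_neg (by tauto : ¬ (w = 0 ∨ h = 0)), hm, hv]
        · simp only [pvSolve, if_neg (by tauto : ¬ (w = 0 ∨ h = 0)), hm]
          exact hinv
      | none =>
        have S1 : ∀ (L : List (Int × Int × Int)), (∀ p ∈ L, p ∈ products) →
            ∀ (s : Int × Array (Array (Option Int))), pvCInv products s.2 →
            (L.foldl (fun (s : Int × Array (Array (Option Int))) p =>
              if p.1 ≤ w ∧ p.2.1 ≤ h then
                let r := pvSolve products f' (w - p.1) (h - p.2.1) s.2
                (max s.1 (p.2.2 + r.1), r.2)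
              else s) s).1
              = L.foldl (fun cur p =>
                if p.1 ≤ w ∧ p.2.1 ≤ h then max cur (p.2.2 + pvFc products (w - p.1) (h - p.2.1))
                else cur) s.1 ∧
            pvCInv products (L.foldl (fun (s : Int × Array (Array (Option Int))) p =>
              if p.1 ≤ w ∧ p.2.1 ≤ h then
                let r := pvSolve products f' (w - p.1) (h - p.2.1) s.2
                (max s.1 (p.2.2 + r.1), r.2)
              else s) s).2 := by
          intro L
          induction L with
          | nil => intro _ s hs; exact ⟨rfl, hs⟩
          | cons p L ihL =>
            intro hmem s hs
            by_cases hc : p.1 ≤ w ∧ p.2.1 ≤ h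
            · have hq := HQ p (hmem p (List.mem_cons_self))
              have hr := IHf (w - p.1) (h - p.2.1) s.2 (by omega) (by omega) (by omega)
                (by omega) (by omega) hs
              simp only [List.foldl_cons, if_pos hc]
              have := ihL (fun q hq => hmem q (List.mem_cons_of_mem p hq))
                (max s.1 (p.2.2 + (pvSolve products f' (w - p.1) (h - p.2.1) s.2).1),
                 (pvSolve products f' (w - p.1) (h - p.2.1) s.2).2) hr.2
              rw [← hr.1]
              exact this
            · simp only [List.foldl_cons, if_neg hc]
              exact ihL (fun q hq => hmem q (List.mem_cons_of_mem p hq)) s hs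
        have S2 : ∀ (L : List Int), (∀ k ∈ L, 1 ≤ k ∧ k < w) →
            ∀ (s : Int × Array (Array (Option Int))), pvCInv products s.2 →
            (L.foldl (fun (s : Int × Array (Array (Option Int))) k =>
              let r1 := pvSolve products f' k h s.2
              let r2 := pvSolve products f' (w - k) h r1.2
              (max s.1 (r1.1 + r2.1), r2.2)) s).1
              = L.foldl (fun cur k =>
                max cur (pvFc products k h + pvFc products (w - k) h)) s.1 ∧
            pvCInv products (L.foldl (fun (s : Int × Array (Array (Option Int))) k =>
              let r1 := pvSolve products f' k h s.2
              let r2 := pvSolve products f' (w - k) h r1.2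
              (max s.1 (r1.1 + r2.1), r2.2)) s).2 := by
          intro L
          induction L with
          | nil => intro _ s hs; exact ⟨rfl, hs⟩
          | cons k L ihL =>
            intro hmem s hs
            rcases hmem k (List.mem_cons_self) with ⟨hk1, hk2⟩
            have hr1 := IHf k h s.2 (by omega) (by omega) (by omega) (by omega) (by omega) hs
            have hr2 := IHf (w - k) h (pvSolve products f' k h s.2).2
              (by omega) (by omega) (by omega) (by omega) (by omega) hr1.2
            simp only [List.foldl_cons]
            have := ihL (fun q hq => hmem q (List.mem_cons_of_mem k hq))
              (max s.1 ((pvSolve products f' k h s.2).1 +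
                (pvSolve products f' (w - k) h (pvSolve products f' k h s.2).2).1),
               (pvSolve products f' (w - k) h (pvSolve products f' k h s.2).2).2) hr2.2
            rw [← hr1.1, ← hr2.1]
            exact this
        have S3 : ∀ (L : List Int), (∀ k ∈ L, 1 ≤ k ∧ k < h) →
            ∀ (s : Int × Array (Array (Option Int))), pvCInv products s.2 →
            (L.foldl (fun (s : Int × Array (Array (Option Int))) k =>
              let r1 := pvSolve products f' w k s.2
              let r2 := pvSolve products f' w (h - k) r1.2
              (max s.1 (r1.1 + r2.1), r2.2)) s).1
              = L.foldl (fun cur k =>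
                max cur (pvFc products w k + pvFc products w (h - k))) s.1 ∧
            pvCInv products (L.foldl (fun (s : Int × Array (Array (Option Int))) k =>
              let r1 := pvSolve products f' w k s.2
              let r2 := pvSolve products f' w (h - k) r1.2
              (max s.1 (r1.1 + r2.1), r2.2)) s).2 := by
          intro L
          induction L with
          | nil => intro _ s hs; exact ⟨rfl, hs⟩
          | cons k L ihL =>
            intro hmem s hs
            rcases hmem k (List.mem_cons_self) with ⟨hk1, hk2⟩
            have hr1 := IHf w k s.2 (by omega) (by omega) (by omega) (by omega) (by omega) hs
            have hr2 := IHf w (h - k) (pvSolve products f' w k s.2).2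
              (by omega) (by omega) (by omega) (by omega) (by omega) hr1.2
            simp only [List.foldl_cons]
            have := ihL (fun q hq => hmem q (List.mem_cons_of_mem k hq))
              (max s.1 ((pvSolve products f' w k s.2).1 +
                (pvSolve products f' w (h - k) (pvSolve products f' w k s.2).2).1),
               (pvSolve products f' w (h - k) (pvSolve products f' w k s.2).2).2) hr2.2
            rw [← hr1.1, ← hr2.1]
            exact this
        have A1 := S1 products (fun p hp => hp) (0, cache) hinv
        have A2 := S2 (PySem.List.pyRange 1 w)
          (fun k hk => PySem.List.mem_pyRange_one.mp hk) _ A1.2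
        have A3 := S3 (PySem.List.pyRange 1 h)
          (fun k hk => PySem.List.mem_pyRange_one.mp hk) _ A2.2
        have hval : ((PySem.List.pyRange 1 h 1).foldl (fun (s : Int × Array (Array (Option Int))) k =>
              let r1 := pvSolve products f' w k s.2
              let r2 := pvSolve products f' w (h - k) r1.2
              (max s.1 (r1.1 + r2.1), r2.2))
            ((PySem.List.pyRange 1 w 1).foldl (fun (s : Int × Array (Array (Option Int))) k =>
              let r1 := pvSolve products f' k h s.2
              let r2 := pvSolve products f' (w - k) h r1.2
              (max s.1 (r1.1 + r2.1), r2.2))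
            (products.foldl (fun (s : Int × Array (Array (Option Int))) p =>
              if p.1 ≤ w ∧ p.2.1 ≤ h then
                let r := pvSolve products f' (w - p.1) (h - p.2.1) s.2
                (max s.1 (p.2.2 + r.1), r.2)
              else s) (0, cache)))).1 = pvFc products w h := by
          rw [A3.1, A2.1, A1.1]
          exact (pvFc_eq_body products X Y HQ w h hw1 hwX hh1 hhY).symm
        constructor
        · show ((pvSolve products (Nat.succ f') w h cache)).1 = pvFc products w h
          simp only [pvSolve, if_neg (by tauto : ¬ (w = 0 ∨ h = 0)), hm]
          exact hval
        · simp only [pvSolve, if_neg (by tauto : ¬ (w = 0 ∨ h = 0)), hm]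
          intro i j u hget
          rcases pvCGet_set_cases _ w h _ i j with hcase | ⟨hi, hj, hcase⟩
          · rw [hcase] at hget
            exact A3.2 i j u hget
          · rw [hcase] at hget
            cases hget
            rw [hval, hi, hj, Int.toNat_of_nonneg hw, Int.toNat_of_nonneg hh]
        
theorem pvCInv_init (products : List (Int × Int × Int)) (n m : Nat) :
    pvCInv products (Array.replicate n (Array.replicate m (none : Option Int))) := by
  intro i j v hget
  exfalso
  simp only [pvCGet, Int.toNat_natCast] at hget
  rw [Array.getElem?_replicate] at hget
  by_cases h1 : i < n
  · rw [if_pos h1] at hget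
    simp only [Option.bind_some] at hget
    rw [Array.getElem?_replicate] at hget
    by_cases h2 : j < m
    · rw [if_pos h2] at hget
      simp at hget
    · rw [if_neg h2] at hget
      simp at hget
  · rw [if_neg h1] at hget
    simp at hget

theorem pv_alt_eq_pvFc (X Y : Int) (products : List (Int × Int × Int))
    (hX : 0 ≤ X) (hY : 0 ≤ Y)
    (HQ : ∀ p ∈ products, (0 ≤ p.1 ∧ 0 ≤ p.2.1 ∧ (0 < p.1 ∨ 0 < p.2.1)) ∨ X < p.1 ∨ Y < p.2.1) :
    max_profit_cloth_cutting_alt X Y products = pvFc products X Y :=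
  (pvSolve_correct products X Y HQ (X.toNat + Y.toNat + 1) X Y _ hX (le_refl X) hY (le_refl Y)
    (by omega) (pvCInv_init products _ _)).1

theorem pv_b_trivial (X Y : Int) (products : List (Int × Int × Int))
    (hz : X = 0 ∨ Y = 0) :
    max_profit_cloth_cutting_alt X Y products = 0 := by
  show (pvSolve products (X.toNat + Y.toNat + 1) X Y _).1 = 0
  simp only [pvSolve, if_pos hz]

-- ---------- Port A side ----------

-- table shape: RL rows, each of length RC
def pvDims (RL RC : Nat) (dp : Array (Array Int)) : Prop :=
  dp.size = RL ∧ ∀ (m : Nat) (row : Array Int), dp[m]? = some row → row.size = RC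

theorem pvDims_set (RL RC : Nat) (dp : Array (Array Int)) (i j v : Int)
    (hd : pvDims RL RC dp) : pvDims RL RC (pvSet2 dp i j v) := by
  obtain ⟨h1, h2⟩ := hd
  constructor
  · simp [pvSet2, h1]
  · intro m row hrow
    simp only [pvSet2, Array.getElem?_modify] at hrow
    cases hg : dp[m]? with
    | none => rw [hg] at hrow; simp at hrow
    | some row0 =>
      rw [hg] at hrow
      simp only [Option.map_some] at hrow
      by_cases he : i.toNat = m
      · rw [if_pos he] at hrow
        injection hrow with hrow
        rw [← hrow, Array.size_setIfInBounds]
        exact h2 m row0 hg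
      · rw [if_neg he] at hrow
        injection hrow with hrow
        rw [← hrow]
        exact h2 m row0 hg

theorem pvGet2_set_same (RL RC : Nat) (dp : Array (Array Int)) (i j v : Int)
    (hd : pvDims RL RC dp) (hiR : i.toNat < RL) (hjR : j.toNat < RC) :
    pvGet2 (pvSet2 dp i j v) i j = v := by
  obtain ⟨h1, h2⟩ := hd
  have hlt : i.toNat < dp.size := by omega
  obtain ⟨row, hrow⟩ : ∃ row, dp[i.toNat]? = some row :=
    ⟨dp[i.toNat], Array.getElem?_eq_getElem hlt⟩
  have hjlt : j.toNat < row.size := by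
    have := h2 _ _ hrow; omega
  simp only [pvGet2, pvSet2, Array.getElem?_modify, hrow, Option.map_some]
  simp only [if_true]
  simp only [Option.bind_some]
  rw [Array.getElem?_setIfInBounds]
  simp [hjlt]

theorem pvGet2_set_other (dp : Array (Array Int)) (i j i' j' v : Int)
    (hi : 0 ≤ i) (hj : 0 ≤ j) (hi' : 0 ≤ i') (hj' : 0 ≤ j')
    (hne : ¬(i' = i ∧ j' = j)) :
    pvGet2 (pvSet2 dp i j v) i' j' = pvGet2 dp i' j' := by
  by_cases hrr : i.toNat = i'.toNat
  · have hii : i' = i := by omega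
    have hjne : ¬ j' = j := fun hc => hne ⟨hii, hc⟩
    have hjj : ¬ j.toNat = j'.toNat := by omega
    cases hg : dp[i'.toNat]? with
    | none => simp [pvGet2, pvSet2, Array.getElem?_modify, hg]
    | some row0 =>
      simp only [pvGet2, pvSet2, Array.getElem?_modify, hg, Option.map_some,
        Option.bind_some, if_pos hrr]
      rw [Array.getElem?_setIfInBounds, if_neg hjj]
  · cases hg : dp[i'.toNat]? with
    | none => simp [pvGet2, pvSet2, Array.getElem?_modify, hg]
    | some row0 =>
      simp only [pvGet2, pvSet2, Array.getElem?_modify, hg, Option.map_some,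
        Option.bind_some, if_neg hrr]

-- the A-table invariant: rows below w (and row w up to column h) hold final values
def pvTab (products : List (Int × Int × Int)) (X Y w h : Int) (dp : Array (Array Int)) : Prop :=
  pvDims (X + 1).toNat (Y + 1).toNat dp ∧
  ∀ i j : Int, 0 ≤ i → i ≤ X → 0 ≤ j → j ≤ Y →
    pvGet2 dp i j = if i < w ∨ (i = w ∧ j ≤ h) then pvFc products i j else 0

-- generic single-cell update loop: each iteration sets cell (w,h) to the max of its
-- current value and an expression reading only other cells
theorem pvFoldCell {α : Type} (c : α → Prop) [DecidablePred c]
    (e : Array (Array Int) → α → Int) (w h : Int) (hw : 0 ≤ w) (hh : 0 ≤ h)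
    (RL RC : Nat) (hwR : w.toNat < RL) (hhR : h.toNat < RC) :
    ∀ (L : List α) (dp0 : Array (Array Int)), pvDims RL RC dp0 →
    (∀ x ∈ L, c x → ∀ dp : Array (Array Int), pvDims RL RC dp →
       (∀ i j : Int, 0 ≤ i → 0 ≤ j → ¬(i = w ∧ j = h) → pvGet2 dp i j = pvGet2 dp0 i j) →
       e dp x = e dp0 x) →
    pvDims RL RC (L.foldl (fun dp x =>
        if c x then pvSet2 dp w h (max (pvGet2 dp w h) (e dp x)) else dp) dp0) ∧
    (∀ i j : Int, 0 ≤ i → 0 ≤ j → ¬(i = w ∧ j = h) →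
      pvGet2 (L.foldl (fun dp x =>
        if c x then pvSet2 dp w h (max (pvGet2 dp w h) (e dp x)) else dp) dp0) i j
        = pvGet2 dp0 i j) ∧
    pvGet2 (L.foldl (fun dp x =>
        if c x then pvSet2 dp w h (max (pvGet2 dp w h) (e dp x)) else dp) dp0) w h
      = L.foldl (fun cur x => if c x then max cur (e dp0 x) else cur) (pvGet2 dp0 w h) := by
  intro L
  induction L with
  | nil => intro dp0 hd he; exact ⟨hd, fun _ _ _ _ _ => rfl, rfl⟩
  | cons x L ihL =>
    intro dp0 hd he
    by_cases hc : c x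
    · simp only [List.foldl_cons, if_pos hc]
      set dp1 := pvSet2 dp0 w h (max (pvGet2 dp0 w h) (e dp0 x)) with hdp1
      have hd1 : pvDims RL RC dp1 := pvDims_set _ _ _ _ _ _ hd
      have hpres1 : ∀ i j : Int, 0 ≤ i → 0 ≤ j → ¬(i = w ∧ j = h) →
          pvGet2 dp1 i j = pvGet2 dp0 i j := by
        intro i j hi hj hne
        exact pvGet2_set_other dp0 w h i j _ hw hh hi hj hne
      have he1 : ∀ y ∈ L, c y → ∀ dp : Array (Array Int), pvDims RL RC dp →
          (∀ i j : Int, 0 ≤ i → 0 ≤ j → ¬(i = w ∧ j = h) → pvGet2 dp i j = pvGet2 dp1 i j) →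
          e dp y = e dp1 y := by
        intro y hy hcy dp hdp hpres
        have h1 : e dp y = e dp0 y := by
          apply he y (List.mem_cons_of_mem x hy) hcy dp hdp
          intro i j hi hj hne
          rw [hpres i j hi hj hne, hpres1 i j hi hj hne]
        have h2 : e dp1 y = e dp0 y :=
          he y (List.mem_cons_of_mem x hy) hcy dp1 hd1 hpres1
        rw [h1, h2]
      obtain ⟨ihd, ihpres, ihcell⟩ := ihL dp1 hd1 he1
      refine ⟨ihd, ?_, ?_⟩
      · intro i j hi hj hne
        rw [ihpres i j hi hj hne, hpres1 i j hi hj hne]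
      · rw [ihcell]
        have hcell1 : pvGet2 dp1 w h = max (pvGet2 dp0 w h) (e dp0 x) :=
          pvGet2_set_same RL RC dp0 w h _ hd hwR hhR
        rw [hcell1]
        apply PySem.List.foldl_congr_mem
        intro acc y hy
        by_cases hcy : c y
        · rw [if_pos hcy, if_pos hcy, he y (List.mem_cons_of_mem x hy) hcy dp1 hd1 hpres1]
        · rw [if_neg hcy, if_neg hcy]
    · simp only [List.foldl_cons, if_neg hc]
      exact ihL dp0 hd (fun y hy => he y (List.mem_cons_of_mem x hy))

theorem pvCellStep (products : List (Int × Int × Int)) (X Y : Int)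
    (HQ : ∀ p ∈ products, (0 ≤ p.1 ∧ 0 ≤ p.2.1 ∧ (0 < p.1 ∨ 0 < p.2.1)) ∨ X < p.1 ∨ Y < p.2.1)
    (w h : Int)
    (hw1 : 1 ≤ w) (hwX : w ≤ X) (hh1 : 1 ≤ h) (hhY : h ≤ Y)
    (dp : Array (Array Int)) (ht : pvTab products X Y w (h - 1) dp) :
    pvTab products X Y w h
      ((PySem.List.pyRange 1 h 1).foldl (fun dp k =>
          pvSet2 dp w h (max (pvGet2 dp w h) (pvGet2 dp w k + pvGet2 dp w (h - k))))
        ((PySem.List.pyRange 1 w 1).foldl (fun dp k =>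
          pvSet2 dp w h (max (pvGet2 dp w h) (pvGet2 dp k h + pvGet2 dp (w - k) h)))
        (products.foldl (fun dp p =>
          if p.1 ≤ w ∧ p.2.1 ≤ h then
            pvSet2 dp w h (max (pvGet2 dp w h) (p.2.2 + pvGet2 dp (w - p.1) (h - p.2.1)))
          else dp) dp))) := by
  obtain ⟨hd, hv⟩ := ht
  have hw : (0 : Int) ≤ w := by omega
  have hh : (0 : Int) ≤ h := by omega
  have hwR : w.toNat < (X + 1).toNat := by omega
  have hhR : h.toNat < (Y + 1).toNat := by omega
  have B1 := pvFoldCell (fun p : Int × Int × Int => p.1 ≤ w ∧ p.2.1 ≤ h)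
    (fun dp p => p.2.2 + pvGet2 dp (w - p.1) (h - p.2.1)) w h hw hh
    (X + 1).toNat (Y + 1).toNat hwR hhR products dp hd ?he1
  case he1 =>
    intro p hp hcp dp' hdp' hpres
    dsimp only
    have hq := HQ p hp
    have := hpres (w - p.1) (h - p.2.1) (by omega) (by omega) (by omega)
    simp only [this]
  obtain ⟨hd1, hpres1, hcell1⟩ := B1
  have B2 := pvFoldCell (fun _ : Int => True)
    (fun dp k => pvGet2 dp k h + pvGet2 dp (w - k) h) w h hw hh
    (X + 1).toNat (Y + 1).toNat hwR hhR (PySem.List.pyRange 1 w 1) _ hd1 ?he2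
  case he2 =>
    intro k hk _ dp' hdp' hpres
    dsimp only
    rcases PySem.List.mem_pyRange_one.mp hk with ⟨hk1, hk2⟩
    rw [hpres k h (by omega) (by omega) (by omega),
      hpres (w - k) h (by omega) (by omega) (by omega)]
  simp only [if_true] at B2
  obtain ⟨hd2, hpres2, hcell2⟩ := B2
  have B3 := pvFoldCell (fun _ : Int => True)
    (fun dp k => pvGet2 dp w k + pvGet2 dp w (h - k)) w h hw hh
    (X + 1).toNat (Y + 1).toNat hwR hhR (PySem.List.pyRange 1 h 1) _ hd2 ?he3
  case he3 =>
    intro k hk _ dp' hdp' hpres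
    dsimp only
    rcases PySem.List.mem_pyRange_one.mp hk with ⟨hk1, hk2⟩
    rw [hpres w k (by omega) (by omega) (by omega),
      hpres w (h - k) (by omega) (by omega) (by omega)]
  simp only [if_true] at B3
  obtain ⟨hd3, hpres3, hcell3⟩ := B3
  refine ⟨hd3, ?_⟩
  intro i j hi hiX hj hjY
  by_cases hij : i = w ∧ j = h
  · obtain ⟨rfl, rfl⟩ := hij
    rw [if_pos (Or.inr ⟨rfl, le_refl j⟩)]
    rw [hcell3, hcell2, hcell1]
    rw [hv i j hi hiX hj hjY, if_neg (by omega : ¬ (i < i ∨ (i = i ∧ j ≤ j - 1)))]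
    have E1 : products.foldl (fun cur p =>
        if p.1 ≤ i ∧ p.2.1 ≤ j then max cur (p.2.2 + pvGet2 dp (i - p.1) (j - p.2.1)) else cur) 0
        = products.foldl (fun cur p =>
        if p.1 ≤ i ∧ p.2.1 ≤ j then max cur (p.2.2 + pvFc products (i - p.1) (j - p.2.1)) else cur) 0 := by
      apply PySem.List.foldl_congr_mem
      intro acc p hp
      by_cases hcp : p.1 ≤ i ∧ p.2.1 ≤ j
      · have hq := HQ p hp
        rw [if_pos hcp, if_pos hcp,
          hv (i - p.1) (j - p.2.1) (by omega) (by omega) (by omega) (by omega),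
          if_pos (by omega : i - p.1 < i ∨ (i - p.1 = i ∧ j - p.2.1 ≤ j - 1))]
      · rw [if_neg hcp, if_neg hcp]
    have E2 : ∀ dp' : Array (Array Int),
        (∀ i' j' : Int, 0 ≤ i' → 0 ≤ j' → ¬(i' = i ∧ j' = j) → pvGet2 dp' i' j' = pvGet2 dp i' j') →
        ∀ init2 : Int, (PySem.List.pyRange 1 i 1).foldl (fun cur k =>
        max cur (pvGet2 dp' k j + pvGet2 dp' (i - k) j)) init2
        = (PySem.List.pyRange 1 i 1).foldl (fun cur k =>
        max cur (pvFc products k j + pvFc products (i - k) j)) init2 := by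
      intro dp' hpr init2
      apply PySem.List.foldl_congr_mem
      intro acc k hk
      rcases PySem.List.mem_pyRange_one.mp hk with ⟨hk1, hk2⟩
      rw [hpr k j (by omega) (by omega) (by omega),
        hv k j (by omega) (by omega) (by omega) (by omega), if_pos (by omega : k < i ∨ (k = i ∧ j ≤ j - 1)),
        hpr (i - k) j (by omega) (by omega) (by omega),
        hv (i - k) j (by omega) (by omega) (by omega) (by omega),
        if_pos (by omega : i - k < i ∨ (i - k = i ∧ j ≤ j - 1))]
    have E3 : ∀ dp' : Array (Array Int),
        (∀ i' j' : Int, 0 ≤ i' → 0 ≤ j' → ¬(i' = i ∧ j' = j) → pvGet2 dp' i' j' = pvGet2 dp i' j') →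
        ∀ init3 : Int, (PySem.List.pyRange 1 j 1).foldl (fun cur k =>
        max cur (pvGet2 dp' i k + pvGet2 dp' i (j - k))) init3
        = (PySem.List.pyRange 1 j 1).foldl (fun cur k =>
        max cur (pvFc products i k + pvFc products i (j - k))) init3 := by
      intro dp' hpr init3
      apply PySem.List.foldl_congr_mem
      intro acc k hk
      rcases PySem.List.mem_pyRange_one.mp hk with ⟨hk1, hk2⟩
      rw [hpr i k (by omega) (by omega) (by omega),
        hv i k (by omega) (by omega) (by omega) (by omega), if_pos (by omega : i < i ∨ (i = i ∧ k ≤ j - 1)),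
        hpr i (j - k) (by omega) (by omega) (by omega),
        hv i (j - k) (by omega) (by omega) (by omega) (by omega),
        if_pos (by omega : i < i ∨ (i = i ∧ j - k ≤ j - 1))]
    rw [E1, E2 _ hpres1,
      E3 _ (fun i' j' h1 h2 h3 => (hpres2 i' j' h1 h2 h3).trans (hpres1 i' j' h1 h2 h3))]
    exact (pvFc_eq_body products X Y HQ i j hw1 hwX hh1 hhY).symm
  · rw [hpres3 i j hi hj hij, hpres2 i j hi hj hij, hpres1 i j hi hj hij,
      hv i j hi hiX hj hjY]
    by_cases hold : i < w ∨ (i = w ∧ j ≤ h - 1)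
    · rw [if_pos hold, if_pos (by omega : i < w ∨ (i = w ∧ j ≤ h))]
    · rw [if_neg hold, if_neg (by omega : ¬ (i < w ∨ (i = w ∧ j ≤ h)))]

-- generic 'for k in range(1, n+1)' loop invariant
theorem pvLoopInv {σ : Type} (f : σ → Int → σ) (P : Int → σ → Prop) :
    ∀ n : Int, 0 ≤ n → ∀ s0 : σ, P 0 s0 →
    (∀ k s, 1 ≤ k → k ≤ n → P (k - 1) s → P k (f s k)) →
    P n ((PySem.List.pyRange 1 (n + 1) 1).foldl f s0) := by
  intro n hn
  induction n, hn using Int.le_induction with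
  | base =>
    intro s0 h0 _
    rw [PySem.List.pyRange_one_eq_nil (by omega)]
    exact h0
  | succ n hn ih =>
    intro s0 h0 hstep
    rw [PySem.List.pyRange_one_succ_right (by omega), List.foldl_append]
    simp only [List.foldl_cons, List.foldl_nil]
    apply hstep (n + 1) _ (by omega) (by omega)
    have he : n + 1 - 1 = n := by ring
    rw [he]
    exact ih s0 h0 (fun k s hk1 hk2 hP => hstep k s hk1 (by omega) hP)

theorem pvTab_shift (products : List (Int × Int × Int)) (X Y w : Int)
    (dp : Array (Array Int)) (ht : pvTab products X Y w Y dp) :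
    pvTab products X Y (w + 1) 0 dp := by
  refine ⟨ht.1, ?_⟩
  intro i j hi hiX hj hjY
  rw [ht.2 i j hi hiX hj hjY]
  by_cases hold : i < w ∨ (i = w ∧ j ≤ Y)
  · rw [if_pos hold, if_pos (by omega : i < w + 1 ∨ (i = w + 1 ∧ j ≤ 0))]
  · rw [if_neg hold]
    by_cases hnew : i < w + 1 ∨ (i = w + 1 ∧ j ≤ 0)
    · rw [if_pos hnew, pvFc_zero products i j (Or.inr (by omega))]
    · rw [if_neg hnew]

theorem pvGet2_replicate (n m : Nat) (i j : Int) :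
    pvGet2 (Array.replicate n (Array.replicate m (0 : Int))) i j = 0 := by
  simp only [pvGet2]
  rw [Array.getElem?_replicate]
  by_cases h1 : i.toNat < n
  · rw [if_pos h1]
    simp only [Option.bind_some]
    rw [Array.getElem?_replicate]
    by_cases h2 : j.toNat < m
    · rw [if_pos h2]; rfl
    · rw [if_neg h2]; rfl
  · rw [if_neg h1]; rfl

theorem pvTab_init (products : List (Int × Int × Int)) (X Y : Int) :
    pvTab products X Y 1 0
      (Array.replicate (X + 1).toNat (Array.replicate (Y + 1).toNat 0)) := by
  constructor
  · constructor
    · simp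
    · intro m row hrow
      rw [Array.getElem?_replicate] at hrow
      by_cases hm : m < (X + 1).toNat
      · rw [if_pos hm] at hrow
        cases hrow
        simp
      · rw [if_neg hm] at hrow
        cases hrow
  · intro i j hi hiX hj hjY
    rw [pvGet2_replicate]
    by_cases hc : i < 1 ∨ (i = 1 ∧ j ≤ 0)
    · rw [if_pos hc, pvFc_zero products i j (by omega)]
    · rw [if_neg hc]

theorem pv_a_eq_pvFc (X Y : Int) (products : List (Int × Int × Int))
    (hX : 0 ≤ X) (hY : 0 ≤ Y)
    (HQ : ∀ p ∈ products, (0 ≤ p.1 ∧ 0 ≤ p.2.1 ∧ (0 < p.1 ∨ 0 < p.2.1)) ∨ X < p.1 ∨ Y < p.2.1) :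
    max_profit_cloth_cutting X Y products = pvFc products X Y := by
  show pvGet2 ((PySem.List.pyRange 1 (X + 1) 1).foldl (fun dp w =>
    (PySem.List.pyRange 1 (Y + 1) 1).foldl (fun dp h =>
      (PySem.List.pyRange 1 h 1).foldl (fun dp k =>
          pvSet2 dp w h (max (pvGet2 dp w h) (pvGet2 dp w k + pvGet2 dp w (h - k))))
        ((PySem.List.pyRange 1 w 1).foldl (fun dp k =>
          pvSet2 dp w h (max (pvGet2 dp w h) (pvGet2 dp k h + pvGet2 dp (w - k) h)))
        (products.foldl (fun dp p =>
          if p.1 ≤ w ∧ p.2.1 ≤ h then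
            pvSet2 dp w h (max (pvGet2 dp w h) (p.2.2 + pvGet2 dp (w - p.1) (h - p.2.1)))
          else dp) dp))) dp)
    (Array.replicate (X + 1).toNat (Array.replicate (Y + 1).toNat 0))) X Y = pvFc products X Y
  have hrows := pvLoopInv (P := fun w dp => pvTab products X Y (w + 1) 0 dp) (f := fun dp w =>
    (PySem.List.pyRange 1 (Y + 1) 1).foldl (fun dp h =>
      (PySem.List.pyRange 1 h 1).foldl (fun dp k =>
          pvSet2 dp w h (max (pvGet2 dp w h) (pvGet2 dp w k + pvGet2 dp w (h - k))))
        ((PySem.List.pyRange 1 w 1).foldl (fun dp k =>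
          pvSet2 dp w h (max (pvGet2 dp w h) (pvGet2 dp k h + pvGet2 dp (w - k) h)))
        (products.foldl (fun dp p =>
          if p.1 ≤ w ∧ p.2.1 ≤ h then
            pvSet2 dp w h (max (pvGet2 dp w h) (p.2.2 + pvGet2 dp (w - p.1) (h - p.2.1)))
          else dp) dp))) dp)
    X hX (Array.replicate (X + 1).toNat (Array.replicate (Y + 1).toNat 0))
    (pvTab_init products X Y) ?hstep
  case hstep =>
    intro k s hk1 hk2 hP
    have hcols := pvLoopInv (P := fun hcol dp => pvTab products X Y k hcol dp) (f := fun dp h =>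
      (PySem.List.pyRange 1 h 1).foldl (fun dp k' =>
          pvSet2 dp k h (max (pvGet2 dp k h) (pvGet2 dp k k' + pvGet2 dp k (h - k'))))
        ((PySem.List.pyRange 1 k 1).foldl (fun dp k' =>
          pvSet2 dp k h (max (pvGet2 dp k h) (pvGet2 dp k' h + pvGet2 dp (k - k') h)))
        (products.foldl (fun dp p =>
          if p.1 ≤ k ∧ p.2.1 ≤ h then
            pvSet2 dp k h (max (pvGet2 dp k h) (p.2.2 + pvGet2 dp (k - p.1) (h - p.2.1)))
          else dp) dp)))
      Y hY s (by
        have he : k - 1 + 1 = k := by ring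
        rw [he] at hP
        exact hP)
      (fun h s' hh1 hhY hP' => pvCellStep products X Y HQ k h hk1 hk2 hh1 hhY s' hP')
    exact pvTab_shift products X Y k _ hcols
  rw [hrows.2 X Y (by omega) (le_refl X) hY (le_refl Y), if_pos (by omega : X < X + 1 ∨ (X = X + 1 ∧ Y ≤ 0))]

theorem pvFoldl_const {σ : Type} (L : List Int) (s : σ) :
    L.foldl (fun s _ => s) s = s := by
  induction L generalizing s with
  | nil => rfl
  | cons x L ih => exact ih s

theorem pv_a_trivial (X Y : Int) (products : List (Int × Int × Int))
    (hz : X = 0 ∨ Y = 0) :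
    max_profit_cloth_cutting X Y products = 0 := by
  show pvGet2 ((PySem.List.pyRange 1 (X + 1) 1).foldl (fun dp w =>
    (PySem.List.pyRange 1 (Y + 1) 1).foldl (fun dp h =>
      (PySem.List.pyRange 1 h 1).foldl (fun dp k =>
          pvSet2 dp w h (max (pvGet2 dp w h) (pvGet2 dp w k + pvGet2 dp w (h - k))))
        ((PySem.List.pyRange 1 w 1).foldl (fun dp k =>
          pvSet2 dp w h (max (pvGet2 dp w h) (pvGet2 dp k h + pvGet2 dp (w - k) h)))
        (products.foldl (fun dp p =>
          if p.1 ≤ w ∧ p.2.1 ≤ h then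
            pvSet2 dp w h (max (pvGet2 dp w h) (p.2.2 + pvGet2 dp (w - p.1) (h - p.2.1)))
          else dp) dp))) dp)
    (Array.replicate (X + 1).toNat (Array.replicate (Y + 1).toNat 0))) X Y = 0
  rcases hz with hx0 | hy0
  · rw [show X + 1 = 0 + 1 by omega, PySem.List.pyRange_one_eq_nil (by omega : (0:Int) + 1 ≤ 1)]
    exact pvGet2_replicate _ _ X Y
  · have hbody : (fun (dp : Array (Array Int)) (w : Int) =>
        (PySem.List.pyRange 1 (Y + 1) 1).foldl (fun dp h =>
          (PySem.List.pyRange 1 h 1).foldl (fun dp k =>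
              pvSet2 dp w h (max (pvGet2 dp w h) (pvGet2 dp w k + pvGet2 dp w (h - k))))
            ((PySem.List.pyRange 1 w 1).foldl (fun dp k =>
              pvSet2 dp w h (max (pvGet2 dp w h) (pvGet2 dp k h + pvGet2 dp (w - k) h)))
            (products.foldl (fun dp p =>
              if p.1 ≤ w ∧ p.2.1 ≤ h then
                pvSet2 dp w h (max (pvGet2 dp w h) (p.2.2 + pvGet2 dp (w - p.1) (h - p.2.1)))
              else dp) dp))) dp)
        = fun (dp : Array (Array Int)) (_ : Int) => dp := by
      funext dp w
      rw [PySem.List.pyRange_one_eq_nil (by omega : Y + 1 ≤ 1)]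
      rfl
    rw [hbody, pvFoldl_const]
    exact pvGet2_replicate _ _ X Y

-- ===== VERDICT (by name: the statement is the Claim_ definition above) =====
theorem max_profit_cloth_cutting_spec : Claim_equal_max_profit_cloth_cutting := by
  intro X Y products _hdom hpre
  obtain ⟨hX, hY, hrest⟩ := hpre
  unfold Spec_max_profit_cloth_cutting
  by_cases hz : X = 0 ∨ Y = 0
  · rw [pv_a_trivial X Y products hz, pv_b_trivial X Y products hz]
  · have HQ : ∀ p ∈ products,
        (0 ≤ p.1 ∧ 0 ≤ p.2.1 ∧ (0 < p.1 ∨ 0 < p.2.1)) ∨ X < p.1 ∨ Y < p.2.1 := by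
      rcases hrest with h | h | h
      · exact (hz (Or.inl h)).elim
      · exact (hz (Or.inr h)).elim
      · exact h
    rw [pv_a_eq_pvFc X Y products hX hY HQ, pv_alt_eq_pvFc X Y products hX hY HQ]
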